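-- pv_equiv track=rewrite | github.com/ItamarOn/GOK-bot | core/engine.py | barcodes_to_queries
-- ===== SOURCE A (Python) =====
-- def barcodes_to_queries(barcode_data):
--     if not barcode_data:
--         return []
--
--     if not barcode_data[0].startswith('0') or len(barcode_data) > 1:
--         return [{"barcode": str(b)} for b in barcode_data]
--
--     barcode = barcode_data[0]
--     barcodes_to_check = [barcode, ]
--     for i in range(1, len(barcode)):
--         if len(barcode) < i or barcode[i - 1] != '0':
--             break
--         barcodes_to_check.append(barcode[i:])
--     return [{"barcode": str(b)} for b in barcodes_to_check]
-- ===== SOURCE B (Python) =====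
-- def barcodes_to_queries(barcode_data):
--     if not barcode_data:
--         return []
--     barcode = barcode_data[0]
--     if not barcode.startswith('0') or len(barcode_data) > 1:
--         return [{"barcode": str(b)} for b in barcode_data]
--     z = len(barcode) - len(barcode.lstrip('0'))
--     n = min(z, len(barcode) - 1)
--     return [{"barcode": barcode[i:]} for i in range(n + 1)]
-- ===== Notes on version B (the rewrite author's own statement) =====
-- stated objective: simpler
-- what changed: Replaces the char-by-char loop with a break by computing the leading-zero count once via lstrip and emitting all suffixes in one comprehension over range(n+1).
import Mathlib
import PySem

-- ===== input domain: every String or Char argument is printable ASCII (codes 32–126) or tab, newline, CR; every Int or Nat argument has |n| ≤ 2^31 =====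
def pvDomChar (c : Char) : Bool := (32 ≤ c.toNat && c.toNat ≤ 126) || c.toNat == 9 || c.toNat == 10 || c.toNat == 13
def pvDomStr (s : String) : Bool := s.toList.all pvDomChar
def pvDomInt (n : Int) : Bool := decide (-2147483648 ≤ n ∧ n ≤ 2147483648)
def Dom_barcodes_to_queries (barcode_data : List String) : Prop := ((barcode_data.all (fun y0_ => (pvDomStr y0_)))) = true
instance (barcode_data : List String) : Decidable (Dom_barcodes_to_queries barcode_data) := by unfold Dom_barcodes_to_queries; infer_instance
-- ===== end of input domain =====

-- B computes the leading-zero count once (lstrip) and emits the suffixes with one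
-- range comprehension, instead of A's char-by-char loop with a break.

-- ===== PORT A =====
-- the 'for i in range(1, len(barcode)): if len(barcode)<i or barcode[i-1] != '0': break; append(barcode[i:])'
-- loop; barcode[i:] for 0 ≤ i is exactly List.drop i on the code points.
def aLoop (bc : List Char) (i : Nat) : List (List Char) :=
  if i < bc.length then
    if bc.length < i ∨ ¬ (PySem.List.pyGet? bc ((i : Int) - 1) = some '0') then []
    else bc.drop i :: aLoop bc (i + 1)
  else []
termination_by bc.length - i

def barcodes_to_queries (barcode_data : List String) : List (List (String × String)) :=
  if barcode_data = [] then []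
  else if ¬ (PySem.Str.startswith (barcode_data.headD "") "0" = true) ∨ barcode_data.length > 1 then
    barcode_data.map (fun b => [("barcode", b)])
  else
    let bc := (barcode_data.headD "").toList
    let barcodes_to_check := bc :: aLoop bc 1
    barcodes_to_check.map (fun b => [("barcode", String.ofList b)])

-- ===== PORT B =====
def barcodes_to_queries_alt (barcode_data : List String) : List (List (String × String)) :=
  match barcode_data with
  | [] => []
  | b :: rest =>
    if ¬ (PySem.Str.startswith b "0" = true) ∨ rest ≠ [] then
      (b :: rest).map (fun s => [("barcode", s)])
    else
      let bc := b.toList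
      -- barcode.lstrip('0') is exactly dropWhile (· == '0') on the code points
      let z := bc.length - (bc.dropWhile (fun c => c == '0')).length
      let n := min z (bc.length - 1)
      (List.range (n + 1)).map (fun i => [("barcode", String.ofList (bc.drop i))])

-- ===== PRECONDITION & SPEC =====
def Spec_barcodes_to_queries (barcode_data : List String) (out : List (List (String × String))) : Prop := out = barcodes_to_queries_alt barcode_data
instance (barcode_data : List String) (out : List (List (String × String))) : Decidable (Spec_barcodes_to_queries barcode_data out) := by unfold Spec_barcodes_to_queries; infer_instance

-- ===== CLAIM (what is proved, stated in full; the proofs are below) =====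
def Claim_equal_barcodes_to_queries : Prop := ∀ (barcode_data : List String), Dom_barcodes_to_queries barcode_data → Spec_barcodes_to_queries barcode_data (barcodes_to_queries barcode_data)

-- ===== LEMMAS AND PROOFS =====

-- leading-zero count, stated via takeWhile
lemma z_eq_takeWhile (bc : List Char) :
    bc.length - (bc.dropWhile (fun c => c == '0')).length = (bc.takeWhile (fun c => c == '0')).length := by
  have h := List.takeWhile_append_dropWhile (p := fun c => c == '0') (l := bc)
  have := congrArg List.length h
  simp only [List.length_append] at this
  omega

lemma getElem_of_lt_takeWhile {bc : List Char} {j : Nat}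
    (h : j < (bc.takeWhile (fun c => c == '0')).length) (hj : j < bc.length) :
    bc[j] = '0' := by
  have hpre : (bc.takeWhile (fun c => c == '0')) <+: bc := List.takeWhile_prefix _
  have : bc[j] = (bc.takeWhile (fun c => c == '0'))[j] := (List.IsPrefix.getElem hpre h).symm
  have hmem : (bc.takeWhile (fun c => c == '0'))[j] ∈ bc.takeWhile (fun c => c == '0') :=
    List.getElem_mem h
  have := List.mem_takeWhile_imp hmem
  simp_all

lemma getElem_takeWhile_len (bc : List Char)
    (h : (bc.takeWhile (fun c => c == '0')).length < bc.length) :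
    ¬ bc[(bc.takeWhile (fun c => c == '0')).length]'h = '0' := by
  induction bc with
  | nil => simp at h
  | cons c t ih =>
    by_cases hc : (c == '0') = true
    · simp only [List.takeWhile_cons, hc, if_true, List.length_cons] at h ⊢
      simpa using ih (by omega)
    · simp only [List.takeWhile_cons, hc] at h ⊢
      simpa using hc

-- main loop characterisation
lemma aLoop_eq (bc : List Char) (z : Nat) (hz : z = (bc.takeWhile (fun c => c == '0')).length)
    (i : Nat) (h1 : 1 ≤ i) (h2 : i ≤ z + 1) :
    aLoop bc i = (List.range' i (min z (bc.length - 1) + 1 - i)).map (bc.drop ·) := by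
  by_cases hlt : i < bc.length
  · have hget : PySem.List.pyGet? bc ((i : Int) - 1) = bc[i-1]? := by
      have : ((i : Int) - 1) = ((i - 1 : Nat) : Int) := by omega
      rw [this, PySem.List.pyGet?_natCast]
    by_cases hz0 : bc[i-1]'(by omega) = '0'
    · -- continue: i - 1 < z (else i - 1 = z and bc[z] ≠ '0')
      have hiz : i ≤ z := by
        by_contra hc
        have hlen2 : (bc.takeWhile (fun c => c == '0')).length < bc.length := by omega
        have hne := getElem_takeWhile_len bc hlen2
        have hidx : (bc.takeWhile (fun c => c == '0')).length = i - 1 := by omega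
        simp only [hidx] at hne
        exact hne hz0
      have : aLoop bc i = bc.drop i :: aLoop bc (i + 1) := by
        rw [aLoop]
        simp only [if_pos hlt, hget, List.getElem?_eq_getElem (by omega : i - 1 < bc.length), hz0]
        simp [show ¬ bc.length < i by omega]
      rw [this, aLoop_eq bc z hz (i + 1) (by omega) (by omega)]
      have hcnt : min z (bc.length - 1) + 1 - i = (min z (bc.length - 1) + 1 - (i + 1)) + 1 := by
        omega
      rw [hcnt, List.range'_succ]
      simp
    · -- break: bc[i-1] ≠ '0', so i - 1 ≥ z, hence i > min z _ and range' is empty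
      have hiz : z ≤ i - 1 := by
        by_contra hc
        exact hz0 (getElem_of_lt_takeWhile (by omega) (by omega))
      have : aLoop bc i = [] := by
        rw [aLoop]
        simp only [if_pos hlt, hget, List.getElem?_eq_getElem (by omega : i - 1 < bc.length)]
        simp [hz0]
      rw [this, show min z (bc.length - 1) + 1 - i = 0 by omega]
      simp
  · have : aLoop bc i = [] := by rw [aLoop]; simp [hlt]
    rw [this, show min z (bc.length - 1) + 1 - i = 0 by omega]
    simp
termination_by bc.length - i

lemma range_succ_map_drop (bc : List Char) (n : Nat) :
    (List.range (n + 1)).map (bc.drop ·) = bc :: (List.range' 1 n).map (bc.drop ·) := by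
  rw [List.range_eq_range', List.range'_succ]
  simp

-- ===== VERDICT (by name: the statement is the Claim_ definition above) =====
theorem barcodes_to_queries_spec : Claim_equal_barcodes_to_queries := by
  intro bd _
  unfold Spec_barcodes_to_queries barcodes_to_queries barcodes_to_queries_alt
  match bd with
  | [] => rfl
  | b :: rest =>
    rw [if_neg (List.cons_ne_nil b rest)]
    simp only [List.headD_cons]
    by_cases hsw : PySem.Str.startswith b "0" = true
    · cases rest with
      | cons x xs =>
        rw [if_pos (Or.inr (by simp)), if_pos (Or.inr (by simp))]
      | nil =>
        have hsw' : PySem.Chars.startswith b.toList ['0'] = true := by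
          simpa using hsw
        rw [if_neg (by simp [hsw']), if_neg (by simp [hsw'])]
        have hpre : (['0'] : List Char) <+: b.toList := (PySem.Chars.startswith_iff _ _).mp hsw'
        have hlen : 1 ≤ b.toList.length := by
          have := hpre.length_le; simpa using this
        have hz1 : 1 ≤ (b.toList.takeWhile (fun c => c == '0')).length := by
          rcases hpre with ⟨t, ht⟩
          rw [← ht]
          simp
        set bc := b.toList with hbc
        set z := (bc.takeWhile (fun c => c == '0')).length with hzdef
        have hloop := aLoop_eq bc z rfl 1 le_rfl (by omega)
        have hzz : bc.length - (bc.dropWhile (fun c => c == '0')).length = z := z_eq_takeWhile bc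
        simp only [hzz]
        have hmain : bc :: aLoop bc 1 = (List.range (min z (bc.length - 1) + 1)).map (bc.drop ·) := by
          rw [range_succ_map_drop, hloop]
          congr 2
        rw [hmain, List.map_map]
        rfl
    · rw [if_pos (Or.inl hsw), if_pos (Or.inl hsw)]
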